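-- pv_equiv track=rewrite | github.com/N4321D/MooseWare | rec_app/subs/driver/timezone.py | parse_tzs
-- ===== SOURCE A (Python) =====
-- def parse_tzs(res) -> dict:
--     """
--     parses list with timezones to dict
--
--     """
--     out = {}
--     for i in res:
--         if not i:
--             continue
--
--         i = i.split("/")
--
--         if len(i) == 1:
--             i.append("")
--
--         if i[0] not in out:
--             out[i[0]] = set()
--
--         out[i[0]].add(i[1])
--
--     return out
-- ===== SOURCE B (Python) =====
-- def parse_tzs(res) -> dict:
--     """
--     parses list with timezones to dict
--
--     """
--     toks = [s.split("/") for s in res if s]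
--     keys = dict.fromkeys(t[0] for t in toks)
--     return {k: {t[1] if len(t) > 1 else "" for t in toks if t[0] == k}
--             for k in keys}
-- ===== Notes on version B (the rewrite author's own statement) =====
-- stated objective: alternative
-- what changed: Replaces A's single incremental pass that mutates a dict of sets with a staged select-per-key scheme: split all tokens once, dedup the first pieces to get the key list, then build each key's set by a separate filtering scan over the token list (nested scans instead of one grouping pass).
import Mathlib
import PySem

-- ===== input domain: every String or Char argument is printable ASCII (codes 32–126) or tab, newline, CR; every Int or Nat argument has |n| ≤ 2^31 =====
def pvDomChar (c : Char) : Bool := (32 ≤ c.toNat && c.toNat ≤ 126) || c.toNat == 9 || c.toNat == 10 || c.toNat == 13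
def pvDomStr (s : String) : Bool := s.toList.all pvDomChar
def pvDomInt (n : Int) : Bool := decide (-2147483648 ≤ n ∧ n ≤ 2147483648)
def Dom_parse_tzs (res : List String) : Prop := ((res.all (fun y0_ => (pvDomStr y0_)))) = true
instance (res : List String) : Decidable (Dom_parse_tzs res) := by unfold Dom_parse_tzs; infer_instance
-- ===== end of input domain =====

-- B replaces A's incremental dict-of-sets pass by a staged select-per-key
-- scheme: dedup the keys, then one filtering scan per key (alternative
-- decomposition, same return value).

-- ===== PORT A =====
-- literal transliteration of A: one pass, skip falsy, split on "/", pad to two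
-- pieces, create the set on first sight of the key, add the second piece.
-- (split("/") always yields a nonempty list, so i[0]/i[1] never raise; the
-- pyGet?-getD "" form is total and exact here.)
def parse_tzs (res : List String) : List (String × List String) :=
  (res.foldl (fun (out : PySem.Dict String (PySem.Set String)) s =>
    if s = "" then out
    else
      let i := (PySem.Str.split? s "/").getD []
      let i := if i.length = 1 then i ++ [""] else i
      let out := if out.contains ((PySem.List.pyGet? i 0).getD "") then out
                 else out.insert ((PySem.List.pyGet? i 0).getD "") PySem.Set.empty
      out.modify ((PySem.List.pyGet? i 0).getD "") []
        (fun st => PySem.Set.add st ((PySem.List.pyGet? i 1).getD ""))) PySem.Dict.empty).items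

-- ===== PORT B =====
-- transliteration of Source B: split all tokens once, dict.fromkeys = ordered
-- dedup (PySem.List.dedup) of the first pieces, then a dict comprehension that
-- builds each key's set by a filtering scan over the tokens (set comprehension
-- = PySem.Set.ofList of the generated elements in generation order).
def parse_tzs_alt (res : List String) : List (String × List String) :=
  let toks := (res.filter (fun s => decide (s ≠ ""))).map
      (fun s => (PySem.Str.split? s "/").getD [])
  let keys := PySem.List.dedup (toks.map (fun t => (PySem.List.pyGet? t 0).getD ""))
  (keys.foldl (fun (d : PySem.Dict String (PySem.Set String)) k =>
      d.insert k (PySem.Set.ofList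
        ((toks.filter (fun t => (PySem.List.pyGet? t 0).getD "" == k)).map
          (fun t => if 1 < t.length then (PySem.List.pyGet? t 1).getD "" else ""))))
    PySem.Dict.empty).items

-- ===== PRECONDITION & SPEC =====
def Spec_parse_tzs (res : List String) (out : List (String × List String)) : Prop := out = parse_tzs_alt res
instance (res : List String) (out : List (String × List String)) : Decidable (Spec_parse_tzs res out) := by unfold Spec_parse_tzs; infer_instance

-- ===== CLAIM (what is proved, stated in full; the proofs are below) =====
def Claim_equal_parse_tzs : Prop := ∀ (res : List String), Dom_parse_tzs res → Spec_parse_tzs res (parse_tzs res)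

-- ===== LEMMAS AND PROOFS =====

-- key and second piece of a token (split result)
def tzK (t : List String) : String := (PySem.List.pyGet? t 0).getD ""
def tzV (t : List String) : String := if 1 < t.length then (PySem.List.pyGet? t 1).getD "" else ""

def toksOf (res : List String) : List (List String) :=
  (res.filter (fun s => decide (s ≠ ""))).map (fun s => (PySem.Str.split? s "/").getD [])

-- A's loop body, expressed on tokens
def tzStepA (d : PySem.Dict String (PySem.Set String)) (t : List String) :
    PySem.Dict String (PySem.Set String) :=
  let d' := if d.contains (tzK t) then d else d.insert (tzK t) PySem.Set.empty
  d'.modify (tzK t) [] (fun st => PySem.Set.add st (tzV t))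

-- the second pieces of the tokens whose key is k, in order
def tzGrp (ts : List (List String)) (k : String) : List String :=
  (ts.filter (fun u => tzK u == k)).map tzV

-- padding bridge: A reads key/second piece from the padded token, B from the raw one
theorem tz_pad_fst (i : List String) :
    (PySem.List.pyGet? (if i.length = 1 then i ++ [""] else i) 0).getD "" = tzK i := by
  rcases i with _ | ⟨a, t⟩
  · simp [tzK]
  · rcases t with _ | ⟨b, t⟩ <;> simp [tzK, PySem.List.pyGet?, PySem.List.pyIdx?]

theorem tz_pad_snd (i : List String) :
    (PySem.List.pyGet? (if i.length = 1 then i ++ [""] else i) 1).getD "" = tzV i := by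
  rcases i with _ | ⟨a, t⟩
  · simp [tzV, PySem.List.pyGet?, PySem.List.pyIdx?]
  · rcases t with _ | ⟨b, t⟩ <;>
      simp [tzV, PySem.List.pyGet?, PySem.List.pyIdx?]

theorem foldA_gen (res : List String) : ∀ (d : PySem.Dict String (PySem.Set String)),
    res.foldl (fun (out : PySem.Dict String (PySem.Set String)) s =>
      if s = "" then out
      else
        let i := (PySem.Str.split? s "/").getD []
        let i := if i.length = 1 then i ++ [""] else i
        let out := if out.contains ((PySem.List.pyGet? i 0).getD "") then out
                   else out.insert ((PySem.List.pyGet? i 0).getD "") PySem.Set.empty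
        out.modify ((PySem.List.pyGet? i 0).getD "") []
          (fun st => PySem.Set.add st ((PySem.List.pyGet? i 1).getD ""))) d
    = (toksOf res).foldl tzStepA d := by
  induction res with
  | nil => intro d; simp [toksOf]
  | cons s res ih =>
    intro d
    by_cases hs : s = ""
    · subst hs
      simpa [toksOf] using ih d
    · have htoks : toksOf (s :: res) = ((PySem.Str.split? s "/").getD []) :: toksOf res := by
        simp [toksOf, hs]
      rw [List.foldl_cons, htoks, List.foldl_cons, ← ih]
      congr 1
      simp only [if_neg hs, tz_pad_fst, tz_pad_snd, tzStepA]

theorem parse_tzs_eq_foldA (res : List String) :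
    parse_tzs res = ((toksOf res).foldl tzStepA PySem.Dict.empty).items := by
  unfold parse_tzs
  rw [foldA_gen]

theorem keys_stepA (d : PySem.Dict String (PySem.Set String)) (t : List String) :
    (tzStepA d t).keys = PySem.Set.add d.keys (tzK t) := by
  unfold tzStepA
  cases h : d.contains (tzK t) with
  | true =>
    rw [if_pos rfl, PySem.Dict.keys_modify, PySem.Dict.keys_insert_of_contains _ _ h]
    have hm : tzK t ∈ d.keys := (PySem.Dict.contains_iff_mem_keys d (tzK t)).mp h
    simp [PySem.Set.add, PySem.Set.contains, hm]
  | false =>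
    rw [if_neg (by simp), PySem.Dict.keys_modify]
    have h' : (d.insert (tzK t) PySem.Set.empty).contains (tzK t) = true :=
      PySem.Dict.contains_insert_self d (tzK t) PySem.Set.empty
    rw [PySem.Dict.keys_insert_of_contains _ _ h',
        PySem.Dict.keys_insert_of_not_contains _ _ h]
    have hm : tzK t ∉ d.keys := fun hmem =>
      by simp [(PySem.Dict.contains_iff_mem_keys d (tzK t)).mpr hmem] at h
    simp [PySem.Set.add, PySem.Set.contains, hm]

theorem keys_foldA : ∀ (l : List (List String)) (d : PySem.Dict String (PySem.Set String)),
    (l.foldl tzStepA d).keys = PySem.Set.update d.keys (l.map tzK)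
  | [], d => by simp [PySem.Set.update]
  | t :: l, d => by
    rw [List.foldl_cons, keys_foldA l, keys_stepA]
    rfl

theorem nodup_keys_foldA : ∀ (l : List (List String)) (d : PySem.Dict String (PySem.Set String)),
    d.keys.Nodup → (l.foldl tzStepA d).keys.Nodup
  | [], d, h => h
  | t :: l, d, h => by
    rw [List.foldl_cons]
    refine nodup_keys_foldA l _ ?_
    rw [keys_stepA]
    exact PySem.Set.nodup_add _ _ h

theorem getD_stepA (d : PySem.Dict String (PySem.Set String)) (t : List String) (k : String) :
    (tzStepA d t).getD k [] =
      if k = tzK t then PySem.Set.add (d.getD (tzK t) []) (tzV t) else d.getD k [] := by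
  unfold tzStepA
  cases h : d.contains (tzK t) with
  | true => rw [if_pos rfl, PySem.Dict.getD_modify]
  | false =>
    rw [if_neg (by simp), PySem.Dict.getD_modify]
    rw [PySem.Dict.getD_of_not_contains d ([] : PySem.Set String) h]
    by_cases hk : k = tzK t
    · simp [hk]
    · simp [hk, PySem.Dict.getD_insert]

theorem getD_foldA : ∀ (l : List (List String)) (d : PySem.Dict String (PySem.Set String)) (k : String),
    (l.foldl tzStepA d).getD k [] = PySem.Set.update (d.getD k []) (tzGrp l k)
  | [], d, k => by simp [tzGrp, PySem.Set.update]
  | t :: l, d, k => by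
    rw [List.foldl_cons, getD_foldA l]
    by_cases hk : tzK t = k
    · have : tzGrp (t :: l) k = tzV t :: tzGrp l k := by simp [tzGrp, hk]
      rw [this, getD_stepA, if_pos hk.symm, hk]
      rfl
    · have : tzGrp (t :: l) k = tzGrp l k := by simp [tzGrp, hk]
      rw [this, getD_stepA, if_neg (fun h => hk h.symm)]

-- B rewritten on the named token/key/group abbreviations (definitional)
theorem parse_tzs_alt_eq (res : List String) :
    parse_tzs_alt res =
      ((PySem.List.dedup ((toksOf res).map tzK)).foldl
        (fun (d : PySem.Dict String (PySem.Set String)) k =>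
          d.insert k (PySem.Set.ofList (tzGrp (toksOf res) k))) PySem.Dict.empty).items := rfl

-- ===== VERDICT (by name: the statement is the Claim_ definition above) =====
theorem parse_tzs_spec : Claim_equal_parse_tzs := by
  intro res _
  unfold Spec_parse_tzs
  rw [parse_tzs_eq_foldA, parse_tzs_alt_eq]
  -- B's fold inserts fresh, distinct keys into an empty dict
  have hfresh : ((PySem.List.dedup ((toksOf res).map tzK)).foldl
      (fun (d : PySem.Dict String (PySem.Set String)) k =>
        d.insert k (PySem.Set.ofList (tzGrp (toksOf res) k))) PySem.Dict.empty).items =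
      (PySem.List.dedup ((toksOf res).map tzK)).map
        (fun k => (k, PySem.Set.ofList (tzGrp (toksOf res) k))) := by
    have h1 : ∀ a ∈ PySem.List.dedup ((toksOf res).map tzK),
        (PySem.Dict.empty : PySem.Dict String (PySem.Set String)).contains a = false :=
      fun a _ => PySem.Dict.contains_empty a
    have h2 : ((PySem.List.dedup ((toksOf res).map tzK)).map id).Nodup := by
      simp only [List.map_id]
      exact PySem.List.nodup_dedup ((toksOf res).map tzK)
    simpa using PySem.Dict.items_foldl_insert_fresh
      (PySem.List.dedup ((toksOf res).map tzK)) id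
      (fun k => PySem.Set.ofList (tzGrp (toksOf res) k)) PySem.Dict.empty h1 h2
  rw [hfresh, PySem.List.dedup_eq_ofList]
  -- A's side: items via keys + values
  have hnA : ((toksOf res).foldl tzStepA PySem.Dict.empty).keys.Nodup :=
    nodup_keys_foldA _ _ PySem.Dict.nodup_keys_empty
  rw [PySem.Dict.items_eq_map_keys _ hnA ([] : PySem.Set String), keys_foldA,
    PySem.Dict.keys_empty, PySem.Set.update_nil_left]
  refine List.map_congr_left (fun k _ => ?_)
  rw [getD_foldA, PySem.Dict.getD_empty, PySem.Set.update_nil_left]
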